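-- pv_equiv track=rewrite | github.com/pnnl/isicle | isicle/process_inchi.py | neutralize
-- ===== SOURCE A (Python) =====
-- def neutralize(inchi):
--     '''Neutralizes an InChI string.'''
--
--     if 'q' in inchi:
--         layers = inchi.split('/')
--         new = layers[0]
--         for i in range(1, len(layers)):
--             if 'q' not in layers[i]:
--                 new += '/' + layers[i]
--         return new
--     return inchi
-- ===== SOURCE B (Python) =====
-- def neutralize(inchi):
--     '''Neutralizes an InChI string.'''
--     out = []
--     i = 0
--     n = len(inchi)
--     while i < n:
--         if inchi[i] == '/':
--             j = i + 1
--             while j < n and inchi[j] != '/':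
--                 j += 1
--             seg = inchi[i:j]
--             if 'q' not in seg:
--                 out.append(seg)
--             i = j
--         else:
--             out.append(inchi[i])
--             i += 1
--     return ''.join(out)
-- ===== Notes on version B (the rewrite author's own statement) =====
-- stated objective: alternative
-- what changed: Instead of splitting the string into a layers list, filtering it and re-concatenating with repeated string '+', B does one left-to-right scan that copies characters and skips any '/'-started segment containing 'q', joining collected pieces once at the end.
import Mathlib
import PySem

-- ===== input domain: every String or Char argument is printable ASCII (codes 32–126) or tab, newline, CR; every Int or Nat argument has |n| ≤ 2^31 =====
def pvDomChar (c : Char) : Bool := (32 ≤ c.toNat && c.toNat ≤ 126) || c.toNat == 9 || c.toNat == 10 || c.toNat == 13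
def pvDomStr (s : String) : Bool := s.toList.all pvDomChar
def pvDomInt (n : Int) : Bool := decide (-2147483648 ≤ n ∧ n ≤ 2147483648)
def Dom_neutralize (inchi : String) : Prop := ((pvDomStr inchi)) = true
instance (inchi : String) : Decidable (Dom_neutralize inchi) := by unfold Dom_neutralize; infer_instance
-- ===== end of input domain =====

-- B replaces A's split('/')/filter/rejoin over a materialised layers list by a single
-- left-to-right scan that copies characters and skips each '/'-segment containing 'q'
-- (alternative decomposition; same cost).


-- ===== PORT A =====
def neutralize (inchi : String) : String :=
  if PySem.Str.isIn "q" inchi then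
    let layers := PySem.Chars.splitOn inchi.toList ['/']
    let new := PySem.List.pyGetD layers 0 []
    String.ofList ((PySem.List.pyRange 1 (PySem.List.len layers) 1).foldl
      (fun new i =>
        let li := PySem.List.pyGetD layers i []
        if PySem.Chars.isIn ['q'] li = false then new ++ '/' :: li else new) new)
  else inchi

-- ===== PORT B =====
-- transliteration of Source B's single while-loop scan: a non-'/' char is copied to out; at a '/'
-- the segment inchi[i:j] (the '/' plus the following run of non-'/' chars) is appended iff it
-- contains no 'q', and the scan resumes at j; the final ''.join(out) is the concatenation.
def subQ : List Char → List Char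
  | [] => []
  | c :: rest =>
    if c = '/' then
      -- seg = inchi[i:j] ('/' plus the run of non-'/' chars), rest' = the scan position j
      if PySem.Chars.isIn ['q'] (c :: rest.takeWhile (· ≠ '/')) = false then
        (c :: rest.takeWhile (· ≠ '/')) ++ subQ (rest.dropWhile (· ≠ '/'))
      else subQ (rest.dropWhile (· ≠ '/'))
    else c :: subQ rest
termination_by l => l.length
decreasing_by
  all_goals simp
  all_goals (have := List.length_dropWhile_le (p := fun x => !decide (x = '/')) (l := rest); omega)

def neutralize_alt (inchi : String) : String := String.ofList (subQ inchi.toList)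

-- ===== PRECONDITION & SPEC =====
def Spec_neutralize (inchi : String) (out : String) : Prop := out = neutralize_alt inchi
instance (inchi : String) (out : String) : Decidable (Spec_neutralize inchi out) := by unfold Spec_neutralize; infer_instance

-- ===== CLAIM (what is proved, stated in full; the proofs are below) =====
def Claim_equal_neutralize : Prop := ∀ (inchi : String), Dom_neutralize inchi → Spec_neutralize inchi (neutralize inchi)

-- ===== LEMMAS AND PROOFS =====

-- the layers list Python's split('/') produces, in structural form
def sp (l : List Char) : List (List Char) := l.splitOnP (· == '/')

-- the filtered rejoin of the non-head layers
def tailJoin (ls : List (List Char)) : List Char :=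
  ls.flatMap (fun li => if PySem.Chars.isIn ['q'] li = false then '/' :: li else [])

lemma sp_nil : sp [] = [[]] := List.splitOnP_nil _

lemma sp_slash (rest : List Char) : sp ('/' :: rest) = [] :: sp rest := by
  simp [sp, List.splitOnP_cons]

lemma sp_cons_ne (c : Char) (rest : List Char) (hc : c ≠ '/') :
    sp (c :: rest) = (sp rest).modifyHead (c :: ·) := by
  simp [sp, List.splitOnP_cons, hc]

lemma sp_ne_nil (l : List Char) : sp l ≠ [] := List.splitOnP_ne_nil _ _

lemma head_dropWhile_false {p : Char → Bool} {l : List Char} {x : Char} {xs : List Char}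
    (h : l.dropWhile p = x :: xs) : p x = false := by
  have h2 := List.head_dropWhile_not p (l := l) (by rw [h]; simp)
  simp only [h, List.head_cons] at h2
  exact h2

lemma go_spec (fuel : Nat) : ∀ (l cur : List Char) (acc : List (List Char)),
    l.length < fuel →
    PySem.Chars.splitOn.go ['/'] fuel l cur acc
      = acc.reverse ++ (sp l).modifyHead (cur.reverse ++ ·) := by
  induction fuel with
  | zero => intro l cur acc h; omega
  | succ fuel ih =>
    intro l cur acc h
    cases l with
    | nil =>
      simp [PySem.Chars.splitOn.go, sp_nil]
    | cons c rest =>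
      rcases hsp : sp rest with _ | ⟨x, xs⟩
      · exact absurd hsp (sp_ne_nil rest)
      by_cases hc : c = '/'
      · subst hc
        have hstep : PySem.Chars.splitOn.go ['/'] (fuel+1) ('/' :: rest) cur acc
            = PySem.Chars.splitOn.go ['/'] fuel rest [] (cur.reverse :: acc) := by
          simp [PySem.Chars.splitOn.go]
        rw [hstep, ih rest [] (cur.reverse :: acc) (by simp at h; omega), sp_slash, hsp]
        simp
      · have hstep : PySem.Chars.splitOn.go ['/'] (fuel+1) (c :: rest) cur acc
            = PySem.Chars.splitOn.go ['/'] fuel rest (c :: cur) acc := by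
          simp [PySem.Chars.splitOn.go, List.isPrefixOf_cons₂]
          intro hcc; exact absurd hcc.symm hc
        rw [hstep, ih rest (c :: cur) acc (by simp at h; omega),
            sp_cons_ne c rest hc, hsp]
        simp

lemma splitOn_eq_sp (l : List Char) : PySem.Chars.splitOn l ['/'] = sp l := by
  have hgo := go_spec (l.length + 1) l [] [] (by omega)
  rcases hsp : sp l with _ | ⟨x, xs⟩
  · exact absurd hsp (sp_ne_nil l)
  · rw [hsp] at hgo
    simpa [PySem.Chars.splitOn, hsp] using hgo

lemma sp_take (l : List Char) :
    sp l = l.takeWhile (· ≠ '/') ::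
      (if l.dropWhile (· ≠ '/') = [] then [] else sp (l.dropWhile (· ≠ '/')).tail) := by
  induction l with
  | nil => simp [sp_nil]
  | cons c rest ih =>
    by_cases hc : c = '/'
    · subst hc
      rw [sp_slash]
      simp [List.takeWhile_cons, List.dropWhile_cons]
    · rw [sp_cons_ne c rest hc, ih, List.modifyHead_cons]
      simp [List.takeWhile_cons, List.dropWhile_cons, hc]

lemma isIn_q (xs : List Char) : PySem.Chars.isIn ['q'] xs = true ↔ 'q' ∈ xs := by
  rw [PySem.Chars.isIn_iff_infix]
  exact List.singleton_infix_iff 'q' xs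

lemma isIn_q_cons_slash (seg : List Char) :
    PySem.Chars.isIn ['q'] ('/' :: seg) = PySem.Chars.isIn ['q'] seg := by
  rw [Bool.eq_iff_iff, isIn_q, isIn_q]
  simp

lemma subQ_slash (rest : List Char) : subQ ('/' :: rest) = tailJoin (sp rest) := by
  have main : ∀ (n : Nat) (rest : List Char), rest.length ≤ n →
      subQ ('/' :: rest) = tailJoin (sp rest) := by
    intro n
    induction n with
    | zero =>
      intro rest hlen
      have hr : rest = [] := by
        cases rest with
        | nil => rfl
        | cons a b => simp at hlen
      subst hr
      rw [subQ]
      rw [sp_nil]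
      simp [tailJoin, subQ, isIn_q_cons_slash]
    | succ n ih =>
      intro rest hlen
      rw [subQ, if_pos rfl, sp_take rest, isIn_q_cons_slash]
      rcases h' : rest.dropWhile (· ≠ '/') with _ | ⟨d, r2⟩
      · simp only [if_pos rfl]
        by_cases hq : PySem.Chars.isIn ['q'] (rest.takeWhile (· ≠ '/')) = false <;>
          simp [tailJoin, subQ, hq]
      · have hd : d = '/' := by simpa using head_dropWhile_false h'
        subst hd
        have hr2 : r2.length ≤ n := by
          have hs := List.length_dropWhile_le (p := fun x => decide (x ≠ '/')) (l := rest)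
          rw [h'] at hs
          simp only [List.length_cons] at hs hlen
          omega
        rw [ih r2 hr2]
        have hne : ('/' :: r2 : List Char) ≠ [] := by simp
        rw [if_neg hne]
        simp only [List.tail_cons]
        cases hq : PySem.Chars.isIn ['q'] (List.takeWhile (fun x => !decide (x = '/')) rest) <;>
          simp [tailJoin, hq]
  exact main rest.length rest le_rfl

lemma subQ_copy (l : List Char) :
    subQ l = l.takeWhile (· ≠ '/') ++ subQ (l.dropWhile (· ≠ '/')) := by
  induction l with
  | nil => simp [subQ]
  | cons c rest ih =>
    by_cases hc : c = '/'
    · subst hc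
      simp [List.takeWhile_cons, List.dropWhile_cons]
    · rw [subQ]
      simp only [List.takeWhile_cons, List.dropWhile_cons, hc, if_neg hc, decide_not]
      simp [hc, ih]

lemma subQ_eq_join (l : List Char) :
    subQ l = (sp l).headI ++ tailJoin (sp l).tail := by
  rw [sp_take l, subQ_copy l]
  rcases h' : l.dropWhile (· ≠ '/') with _ | ⟨d, r2⟩
  · simp [subQ, tailJoin]
  · have hd : d = '/' := by simpa using head_dropWhile_false h'
    subst hd
    rw [subQ_slash]
    simp

lemma subQ_no_q (l : List Char) (h : 'q' ∉ l) : subQ l = l := by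
  have main : ∀ (n : Nat) (l : List Char), l.length ≤ n → 'q' ∉ l → subQ l = l := by
    intro n
    induction n with
    | zero =>
      intro l hlen _
      have hl : l = [] := by
        cases l with
        | nil => rfl
        | cons a b => simp at hlen
      subst hl; simp [subQ]
    | succ n ih =>
      intro l hlen hq
      cases l with
      | nil => simp [subQ]
      | cons c rest =>
        by_cases hc : c = '/'
        · subst hc
          rw [subQ, if_pos rfl]
          have hseg : PySem.Chars.isIn ['q'] ('/' :: rest.takeWhile (· ≠ '/')) = false := by
            rw [isIn_q_cons_slash, Bool.eq_false_iff]
            intro hmem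
            exact hq (List.mem_cons_of_mem _
              ((List.takeWhile_sublist _).subset ((isIn_q _).mp hmem)))
          rw [hseg, if_pos rfl]
          have hr' : subQ (rest.dropWhile (· ≠ '/')) = rest.dropWhile (· ≠ '/') := by
            apply ih
            · have hs := List.length_dropWhile_le (p := fun x => decide (x ≠ '/')) (l := rest)
              simp only [List.length_cons] at hlen
              omega
            · intro hmem
              exact hq (List.mem_cons_of_mem _ ((List.dropWhile_sublist _).subset hmem))
          rw [hr']
          simp [List.takeWhile_append_dropWhile]
        · rw [subQ, if_neg hc]
          have hrest : subQ rest = rest := by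
            apply ih
            · simp only [List.length_cons] at hlen; omega
            · intro hmem; exact hq (List.mem_cons_of_mem _ hmem)
          rw [hrest]
  exact main l.length l le_rfl h

-- ===== VERDICT (by name: the statement is the Claim_ definition above) =====
theorem neutralize_spec : Claim_equal_neutralize := by
  intro inchi _
  unfold Spec_neutralize neutralize neutralize_alt
  by_cases hq : PySem.Str.isIn "q" inchi
  · rw [if_pos hq]
    simp only [String.ofList_inj]
    rw [splitOn_eq_sp]
    have hfold :
        (PySem.List.pyRange 1 (PySem.List.len (sp inchi.toList)) 1).foldl
          (fun new i =>
            if PySem.Chars.isIn ['q'] (PySem.List.pyGetD (sp inchi.toList) i []) = false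
            then new ++ '/' :: PySem.List.pyGetD (sp inchi.toList) i [] else new)
          (PySem.List.pyGetD (sp inchi.toList) 0 []) =
        ((sp inchi.toList).drop (1 : Int).toNat).foldl
          (fun acc li => if PySem.Chars.isIn ['q'] li = false then acc ++ '/' :: li else acc)
          (PySem.List.pyGetD (sp inchi.toList) 0 []) := by
      exact PySem.List.foldl_pyRange_pyGetD (sp inchi.toList) []
        (fun acc li => if PySem.Chars.isIn ['q'] li = false then acc ++ '/' :: li else acc)
        (PySem.List.pyGetD (sp inchi.toList) 0 []) (by norm_num)
    rw [hfold]
    have hbody :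
        (fun (acc : List Char) (li : List Char) =>
            if PySem.Chars.isIn ['q'] li = false then acc ++ '/' :: li else acc) =
        (fun acc li =>
            acc ++ (if PySem.Chars.isIn ['q'] li = false then '/' :: li else [])) := by
      funext acc li
      by_cases h : PySem.Chars.isIn ['q'] li = false <;> simp [h]
    rw [hbody, PySem.List.foldl_append_eq_flatMap]
    rcases hsp : sp inchi.toList with _ | ⟨x, xs⟩
    · exact absurd hsp (sp_ne_nil _)
    · rw [subQ_eq_join, hsp]
      simp [tailJoin, PySem.List.pyGetD_zero_cons]
  · rw [if_neg hq]
    have hmem : 'q' ∉ inchi.toList := by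
      intro hmem
      apply hq
      rw [PySem.Str.isIn_iff_infix]
      exact (List.singleton_infix_iff 'q' inchi.toList).mpr hmem
    rw [subQ_no_q _ hmem, String.ofList_toList]
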